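-- pv_equiv track=rewrite | github.com/aewing05/AdventOfCode2018 | Day2SolutionPython.py | getCodeChecksum
-- ===== SOURCE A (Python) =====
-- from collections import Counter
--
-- def getCodeChecksum(codes):
-- 	twice = 0
-- 	thrice = 0
-- 	for code in codes:
-- 		counts = Counter(code).values()
-- 		if 2 in counts:
-- 			if 3 in counts:
-- 				twice = twice + 1
-- 				thrice = thrice + 1
-- 			else:
-- 				twice = twice + 1
-- 		elif 3 in counts:
-- 			thrice = thrice + 1
-- 	return twice * thrice
-- ===== SOURCE B (Python) =====
-- def getCodeChecksum(codes):
--     # sort-then-scan over runs instead of Counter hash counts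
--     twice = 0
--     thrice = 0
--     for code in codes:
--         s = sorted(code)
--         has2 = False
--         has3 = False
--         i = 0
--         n = len(s)
--         while i < n:
--             j = i + 1
--             while j < n and s[j] == s[i]:
--                 j += 1
--             run = j - i
--             if run == 2:
--                 has2 = True
--             elif run == 3:
--                 has3 = True
--             i = j
--         if has2:
--             twice += 1
--         if has3:
--             thrice += 1
--     return twice * thrice
-- ===== Notes on version B (the rewrite author's own statement) =====
-- stated objective: faster
-- what changed: Replaces the per-code Counter hash-count plus values-membership test with sorting each code's characters and a single scan over consecutive runs, recording whether some run has length exactly 2 or exactly 3.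
import Mathlib
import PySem

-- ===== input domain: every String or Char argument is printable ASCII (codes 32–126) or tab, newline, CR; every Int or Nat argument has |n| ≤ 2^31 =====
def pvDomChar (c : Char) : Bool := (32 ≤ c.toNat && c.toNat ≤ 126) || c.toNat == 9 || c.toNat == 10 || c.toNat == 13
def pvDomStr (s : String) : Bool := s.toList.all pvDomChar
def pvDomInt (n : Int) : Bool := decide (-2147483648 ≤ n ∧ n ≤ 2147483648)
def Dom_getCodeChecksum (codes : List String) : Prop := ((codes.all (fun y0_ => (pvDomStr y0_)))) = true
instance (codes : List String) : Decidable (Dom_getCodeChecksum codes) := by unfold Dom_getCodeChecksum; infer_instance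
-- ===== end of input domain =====

-- B replaces A's per-code Counter hash counts + values-membership with sort-then-scan
-- over consecutive runs (alternative decomposition, same results).

-- ===== PORT A =====
def getCodeChecksum (codes : List String) : Int :=
  let st := codes.foldl (fun (st : Int × Int) code =>
    let counts := (PySem.Dict.counter code.toList).values
    if counts.contains 2 then
      if counts.contains 3 then (st.1 + 1, st.2 + 1)
      else (st.1 + 1, st.2)
    else if counts.contains 3 then (st.1, st.2 + 1)
    else st) ((0 : Int), (0 : Int))
  st.1 * st.2

-- ===== PORT B =====
-- one pass over the sorted characters: for each maximal run, record length-2 / length-3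
def runScan (s : List Char) : Bool × Bool :=
  match s with
  | [] => (false, false)
  | c :: rest =>
    let run : Nat := 1 + (rest.takeWhile (· == c)).length
    let p := runScan (rest.dropWhile (· == c))
    (p.1 || run == 2, p.2 || run == 3)
termination_by s.length
decreasing_by
  simp only [List.length_cons]
  exact Nat.lt_succ_of_le (List.length_dropWhile_le _ _)

def getCodeChecksum_alt (codes : List String) : Int :=
  let st := codes.foldl (fun (st : Int × Int) code =>
    let p := runScan (PySem.List.sorted code.toList (fun x => x) false)
    (st.1 + (if p.1 then 1 else 0), st.2 + (if p.2 then 1 else 0))) ((0 : Int), (0 : Int))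
  st.1 * st.2

-- ===== PRECONDITION & SPEC =====
def Spec_getCodeChecksum (codes : List String) (out : Int) : Prop := out = getCodeChecksum_alt codes
instance (codes : List String) (out : Int) : Decidable (Spec_getCodeChecksum codes out) := by unfold Spec_getCodeChecksum; infer_instance

-- ===== CLAIM (what is proved, stated in full; the proofs are below) =====
def Claim_equal_getCodeChecksum : Prop := ∀ (codes : List String), Dom_getCodeChecksum codes → Spec_getCodeChecksum codes (getCodeChecksum codes)

-- ===== LEMMAS AND PROOFS =====

-- proof-side helper: one component of the run scan
def hasRun (k : Nat) (s : List Char) : Bool :=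
  match s with
  | [] => false
  | c :: rest =>
    ((1 + (rest.takeWhile (· == c)).length == k) || hasRun k (rest.dropWhile (· == c)))
termination_by s.length
decreasing_by
  simp only [List.length_cons]
  exact Nat.lt_succ_of_le (List.length_dropWhile_le _ _)

theorem runScan_eq_hasRun (s : List Char) : runScan s = (hasRun 2 s, hasRun 3 s) := by
  induction s using runScan.induct with
  | case1 => simp [runScan, hasRun]
  | case2 c rest ih =>
    rw [runScan, hasRun, hasRun]
    simp only [ih]
    simp [Bool.or_comm]

theorem hasRun_spec (k : Nat) (s : List Char) (hs : s.Pairwise (· ≤ ·)) :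
    hasRun k s = true ↔ ∃ c ∈ s, s.count c = k := by
  induction s using hasRun.induct with
  | case1 => simp [hasRun]
  | case2 c rest ih =>
    rw [hasRun]
    rcases List.pairwise_cons.mp hs with ⟨hc, hrest⟩
    set t := rest.takeWhile (· == c) with ht
    set d := rest.dropWhile (· == c) with hd
    have htd : t ++ d = rest := List.takeWhile_append_dropWhile
    have htc : ∀ x ∈ t, x = c := by
      intro x hx
      have := List.mem_takeWhile_imp hx
      exact eq_of_beq this
    have hdlt : ∀ x ∈ d, c < x := by
      intro x hx
      have hxr : x ∈ rest := by rw [← htd]; exact List.mem_append_right _ hx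
      have hle : c ≤ x := hc x hxr
      cases hdd : d with
      | nil => rw [hdd] at hx; simp at hx
      | cons e d' =>
        have hd' : rest.dropWhile (· == c) = e :: d' := hd.symm.trans hdd
        have hne' : e ≠ c := by
          have h0 := List.head?_dropWhile_not (· == c) rest
          rw [hd'] at h0
          simpa using h0
        have hce : c ≤ e := by
          have he : e ∈ rest := by
            rw [← htd, hdd]; exact List.mem_append_right _ (by simp)
          exact hc e he
        have hced : c < e := lt_of_le_of_ne hce (Ne.symm hne')
        have hdpw : d.Pairwise (· ≤ ·) := hrest.sublist (List.dropWhile_sublist _)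
        rw [hdd] at hx
        rcases List.mem_cons.mp hx with h | h
        · exact h ▸ hced
        · have hex : e ≤ x := by
            rw [hdd] at hdpw
            exact (List.pairwise_cons.mp hdpw).1 x h
          exact lt_of_lt_of_le hced hex
    have hdne : ∀ x ∈ d, x ≠ c := fun x hx => (hdlt x hx).ne'
    have hdpw : d.Pairwise (· ≤ ·) := hrest.sublist (List.dropWhile_sublist _)
    have hcount_c : (c :: rest).count c = 1 + t.length := by
      rw [← htd]
      have h1 : t.count c = t.length := List.count_eq_length.mpr (by
        intro b hb; exact ((htc b hb).symm ▸ rfl))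
      have h2 : d.count c = 0 := List.count_eq_zero.mpr (fun h => (hdne c h) rfl)
      simp [h1, h2]
      omega
    have hcount_ne : ∀ x, x ≠ c → (c :: rest).count x = d.count x := by
      intro x hx
      rw [← htd]
      have h1 : t.count x = 0 := List.count_eq_zero.mpr (fun h => hx (htc x h))
      have h2 : ¬ (c = x) := fun hcx => hx hcx.symm
      simp [h1, h2]
    constructor
    · intro h
      rcases Bool.or_eq_true_iff.mp h with h | h
      · exact ⟨c, by simp, by rw [hcount_c]; simpa using h⟩
      · rcases (ih hdpw).mp h with ⟨x, hx, hxc⟩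
        refine ⟨x, ?_, ?_⟩
        · have : x ∈ rest := by rw [← htd]; exact List.mem_append_right _ hx
          exact List.mem_cons_of_mem _ this
        · rw [hcount_ne x (hdne x hx)]; exact hxc
    · rintro ⟨x, hx, hxc⟩
      rcases List.mem_cons.mp hx with h | h
      · subst h
        rw [hcount_c] at hxc
        exact Bool.or_eq_true_iff.mpr (Or.inl (by simpa using hxc))
      · rw [← htd] at h
        rcases List.mem_append.mp h with h | h
        · have := htc x h; subst this
          rw [hcount_c] at hxc
          exact Bool.or_eq_true_iff.mpr (Or.inl (by simpa using hxc))
        · have hxne : x ≠ c := hdne x h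
          rw [hcount_ne x hxne] at hxc
          exact Bool.or_eq_true_iff.mpr (Or.inr ((ih hdpw).mpr ⟨x, h, hxc⟩))

theorem counter_contains_iff (l : List Char) (k : Nat) :
    ((PySem.Dict.counter l).values.contains (k : Int)) = true ↔ ∃ c ∈ l, l.count c = k := by
  have hv : (PySem.Dict.counter l).values
      = ((PySem.Set.ofList l : List Char).map (fun c => (l.count c : Int))) := by
    simp only [PySem.Dict.values, PySem.Dict.items_counter, List.map_map]
    rfl
  rw [hv]
  simp only [List.contains_iff_mem, List.mem_map]
  constructor
  · rintro ⟨c, hc, hck⟩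
    exact ⟨c, (PySem.Set.mem_ofList _ _).mp hc, by exact_mod_cast hck⟩
  · rintro ⟨c, hc, hck⟩
    exact ⟨c, (PySem.Set.mem_ofList _ _).mpr hc, by exact_mod_cast hck⟩

-- per-code: the two booleans of the run scan equal A's membership tests
theorem perCode (code : String) :
    runScan (PySem.List.sorted code.toList (fun x => x) false)
      = ((PySem.Dict.counter code.toList).values.contains 2,
         (PySem.Dict.counter code.toList).values.contains 3) := by
  set l := code.toList
  set s := PySem.List.sorted l (fun x => x) false with hsdef
  have hpw : s.Pairwise (· ≤ ·) := PySem.List.sorted_pairwise l (fun x => x)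
  have hperm : s.Perm l := PySem.List.sorted_perm l (fun x => x) false
  have hcomp : ∀ k : Nat, hasRun k s = ((PySem.Dict.counter l).values.contains (k : Int)) := by
    intro k
    have h1 := hasRun_spec k s hpw
    have h2 := counter_contains_iff l k
    have hsame : (∃ c ∈ s, s.count c = k) ↔ (∃ c ∈ l, l.count c = k) := by
      constructor
      · rintro ⟨c, hc, hck⟩; exact ⟨c, hperm.mem_iff.mp hc, by rw [← hperm.count_eq]; exact hck⟩
      · rintro ⟨c, hc, hck⟩; exact ⟨c, hperm.mem_iff.mpr hc, by rw [hperm.count_eq]; exact hck⟩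
    have := h1.trans (hsame.trans h2.symm)
    exact Bool.coe_iff_coe.mp this
  rw [runScan_eq_hasRun]
  have h2 := hcomp 2
  have h3 := hcomp 3
  rw [h2, h3]
  norm_num

theorem step_eq (st : Int × Int) (code : String) :
    (let counts := (PySem.Dict.counter code.toList).values
     if counts.contains 2 then
       if counts.contains 3 then (st.1 + 1, st.2 + 1)
       else (st.1 + 1, st.2)
     else if counts.contains 3 then (st.1, st.2 + 1)
     else st)
    = (let p := runScan (PySem.List.sorted code.toList (fun x => x) false)
       (st.1 + (if p.1 then 1 else 0), st.2 + (if p.2 then 1 else 0))) := by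
  simp only [perCode code]
  cases h2 : (PySem.Dict.counter code.toList).values.contains 2 <;>
    cases h3 : (PySem.Dict.counter code.toList).values.contains 3 <;> simp

theorem foldl_eq (codes : List String) : ∀ st : Int × Int,
    codes.foldl (fun (st : Int × Int) code =>
      let counts := (PySem.Dict.counter code.toList).values
      if counts.contains 2 then
        if counts.contains 3 then (st.1 + 1, st.2 + 1)
        else (st.1 + 1, st.2)
      else if counts.contains 3 then (st.1, st.2 + 1)
      else st) st
    = codes.foldl (fun (st : Int × Int) code =>
      let p := runScan (PySem.List.sorted code.toList (fun x => x) false)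
      (st.1 + (if p.1 then 1 else 0), st.2 + (if p.2 then 1 else 0))) st := by
  induction codes with
  | nil => intro st; rfl
  | cons c cs ih =>
    intro st
    simp only [List.foldl_cons]
    rw [step_eq st c]
    exact ih _

-- ===== VERDICT (by name: the statement is the Claim_ definition above) =====
theorem getCodeChecksum_spec : Claim_equal_getCodeChecksum := by
  intro codes _
  unfold Spec_getCodeChecksum getCodeChecksum getCodeChecksum_alt
  rw [foldl_eq codes (0, 0)]
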